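-- pv_equiv track=rewrite | github.com/glimpse-project/glimpse-training-data | glimpse-data-stats.py | get_percentage_bar
-- ===== SOURCE A (Python) =====
-- hbars = [u"\u0020", u"\u258f", u"\u258e", u"\u258d", u"\u258b", u"\u258a", u"\u2589"]
--
-- max_bar_width = 10
--
-- def get_percentage_bar(value, max_entries):
--     bar_len = int(max_bar_width * 6 * value / max_entries)
--     bar_output = ""
--     for i in range(0, max_bar_width):
--         if bar_len > 6:
--             bar_output += hbars[6]
--             bar_len -= 6
--         else:
--             bar_output += hbars[bar_len]
--             bar_len = 0
--     return bar_output
-- ===== SOURCE B (Python) =====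
-- hbars = [u"\u0020", u"\u258f", u"\u258e", u"\u258d", u"\u258b", u"\u258a", u"\u2589"]
--
-- max_bar_width = 10
--
-- def _render(bar_len):
--     if bar_len <= 6:
--         return hbars[bar_len] + hbars[0] * (max_bar_width - 1)
--     b = min(bar_len, 6 * max_bar_width)
--     full, rem = divmod(b, 6)
--     return hbars[6] * full + (hbars[rem] if rem else '') + hbars[0] * (max_bar_width - full - (1 if rem else 0))
--
-- def get_percentage_bar(value, max_entries):
--     return _render(int(max_bar_width * 6 * value / max_entries))
-- ===== Notes on version B (the rewrite author's own statement) =====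
-- stated objective: simpler
-- what changed: Replaces A's 10-iteration per-cell loop that subtracts 6 each step with a closed-form divmod rendering: one divmod plus string repetitions (with a direct single-cell case for bar_len <= 6).
import Mathlib
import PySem

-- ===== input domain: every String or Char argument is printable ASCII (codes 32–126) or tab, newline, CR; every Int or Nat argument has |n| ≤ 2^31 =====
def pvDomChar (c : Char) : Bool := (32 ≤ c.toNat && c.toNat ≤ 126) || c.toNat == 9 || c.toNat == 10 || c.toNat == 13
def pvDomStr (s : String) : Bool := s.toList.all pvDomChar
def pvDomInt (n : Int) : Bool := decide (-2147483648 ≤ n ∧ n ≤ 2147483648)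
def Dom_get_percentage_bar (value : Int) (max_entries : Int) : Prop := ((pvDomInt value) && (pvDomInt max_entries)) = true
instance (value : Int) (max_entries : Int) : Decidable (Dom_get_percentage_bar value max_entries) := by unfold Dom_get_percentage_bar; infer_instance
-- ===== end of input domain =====

-- B replaces A's 10-step subtract-6-per-cell loop by a closed divmod formula (objective: simpler).

-- ===== PORT A =====
-- hbars = [" ", "▏", "▎", "▍", "▋", "▊", "▉"]  (A's list; note U+258C is absent in the source)
def pvHbars : List Char := [' ', '\u258F', '\u258E', '\u258D', '\u258B', '\u258A', '\u2589']

-- the 'for i in range(0, max_bar_width)' loop: state = (bar_output, bar_len), one step per cell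
def pvLoopA : Nat → List Char → Int → List Char
  | 0, out, _ => out
  | n + 1, out, bl =>
    if bl > 6 then pvLoopA n (out ++ [(PySem.List.pyGet? pvHbars 6).getD ' ']) (bl - 6)
    else pvLoopA n (out ++ [(PySem.List.pyGet? pvHbars bl).getD ' ']) 0

-- bar_len = int(max_bar_width * 6 * value / max_entries): PySem.Int.truncdiv is exact here (|60*value| < 2^53)
def get_percentage_bar (value : Int) (max_entries : Int) : String :=
  let bar_len := PySem.Int.truncdiv (10 * 6 * value) max_entries
  String.ofList (pvLoopA 10 [] bar_len)

-- ===== PORT B =====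
def pvRender (bar_len : Int) : List Char :=
  if bar_len ≤ 6 then
    [(PySem.List.pyGet? pvHbars bar_len).getD ' '] ++ List.replicate 9 ' '
  else
    let b := min bar_len (6 * 10)
    let full := PySem.Int.floordiv b 6
    let rem := PySem.Int.mod b 6
    List.replicate full.toNat '\u2589'
      ++ (if rem ≠ 0 then [(PySem.List.pyGet? pvHbars rem).getD ' '] else [])
      ++ List.replicate (10 - full - (if rem ≠ 0 then 1 else 0)).toNat ' '

def get_percentage_bar_alt (value : Int) (max_entries : Int) : String :=
  String.ofList (pvRender (PySem.Int.truncdiv (10 * 6 * value) max_entries))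

-- ===== PRECONDITION & SPEC =====
-- Pre_ excludes exactly the inputs where A raises: max_entries = 0 (ZeroDivisionError) and
-- bar_len ≤ -8 (hbars[bar_len] IndexError past Python's negative-index range).
def Pre_get_percentage_bar (value : Int) (max_entries : Int) : Prop :=
  max_entries ≠ 0 ∧ -7 ≤ PySem.Int.truncdiv (10 * 6 * value) max_entries
instance (value : Int) (max_entries : Int) : Decidable (Pre_get_percentage_bar value max_entries) := by
  unfold Pre_get_percentage_bar; infer_instance

def pvWitness_get_percentage_bar : Int × Int := (7, 20)

def Spec_get_percentage_bar (value : Int) (max_entries : Int) (out : String) : Prop := out = get_percentage_bar_alt value max_entries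
instance (value : Int) (max_entries : Int) (out : String) : Decidable (Spec_get_percentage_bar value max_entries out) := by unfold Spec_get_percentage_bar; infer_instance

-- ===== CLAIM (what is proved, stated in full; the proofs are below) =====
def Claim_equal_get_percentage_bar : Prop := ∀ (value : Int) (max_entries : Int), Dom_get_percentage_bar value max_entries → Pre_get_percentage_bar value max_entries → Spec_get_percentage_bar value max_entries (get_percentage_bar value max_entries)

-- ===== LEMMAS AND PROOFS =====

-- while bar_len stays > 6 for every remaining cell, A's loop emits only full blocks
theorem pvLoopA_full (k : Nat) : ∀ (out : List Char) (bl : Int), 6 * (k : Int) < bl →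
    pvLoopA k out bl = out ++ List.replicate k '\u2589' := by
  induction k with
  | zero => intro out bl _; simp [pvLoopA]
  | succ n ih =>
    intro out bl h
    have h6 : bl > 6 := by omega
    rw [pvLoopA, if_pos h6, ih _ (bl - 6) (by push_cast at h ⊢; omega)]
    simp [List.replicate_succ, List.append_assoc, PySem.List.pyGet?, PySem.List.pyIdx?, pvHbars]

theorem pvRender_big (n : Int) (h : 60 < n) : pvRender n = List.replicate 10 '\u2589' := by
  have hmin : min n (6 * 10) = 60 := by omega
  simp only [pvRender, if_neg (show ¬ n ≤ 6 by omega), hmin]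
  decide

-- the two renderings agree on every bar_len in [-7, 60] (finite check)
theorem pv_small (k : Nat) (hk : k < 68) :
    pvLoopA 10 [] ((k : Int) - 7) = pvRender ((k : Int) - 7) := by
  revert k hk; decide

theorem pv_core (n : Int) (hn : -7 ≤ n) : String.ofList (pvLoopA 10 [] n) = String.ofList (pvRender n) := by
  by_cases h : n ≤ 60
  · have hk : ((n + 7).toNat : Int) - 7 = n := by omega
    have := pv_small (n + 7).toNat (by omega)
    rw [hk] at this
    rw [this]
  · rw [pvLoopA_full 10 [] n (by omega), pvRender_big n (by omega), List.nil_append]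


-- ===== VERDICT (by name: the statement is the Claim_ definition above) =====
theorem get_percentage_bar_spec : Claim_equal_get_percentage_bar := by
  intro value max_entries _ hpre
  show _ = _
  rw [get_percentage_bar, get_percentage_bar_alt]
  exact pv_core _ hpre.2
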